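-- pv_equiv track=rewrite | github.com/TisoOfficiel/Adopt_une_Mtx | compatibilite_function.py | switch_age_value
-- ===== SOURCE A (Python) =====
-- def switch_age_value(argument):
--     x = 6
--     result = 1
--     i=24
--     while i < 61:
--         if argument <=i :
--             argument =result
--             break
--         result +=1
--         i+=x
--         x=10
--     return result
-- ===== SOURCE B (Python) =====
-- import bisect
--
-- def switch_age_value(argument):
--     return 1 + bisect.bisect_left([24, 30, 40, 50, 60], argument)
-- ===== Notes on version B (the rewrite author's own statement) =====
-- stated objective: simpler
-- what changed: Replaces A's sequential early-breaking while-loop scan with accumulator/threshold-step state by a one-line binary search (bisect_left) over the fixed threshold list [24,30,40,50,60].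
import Mathlib
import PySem

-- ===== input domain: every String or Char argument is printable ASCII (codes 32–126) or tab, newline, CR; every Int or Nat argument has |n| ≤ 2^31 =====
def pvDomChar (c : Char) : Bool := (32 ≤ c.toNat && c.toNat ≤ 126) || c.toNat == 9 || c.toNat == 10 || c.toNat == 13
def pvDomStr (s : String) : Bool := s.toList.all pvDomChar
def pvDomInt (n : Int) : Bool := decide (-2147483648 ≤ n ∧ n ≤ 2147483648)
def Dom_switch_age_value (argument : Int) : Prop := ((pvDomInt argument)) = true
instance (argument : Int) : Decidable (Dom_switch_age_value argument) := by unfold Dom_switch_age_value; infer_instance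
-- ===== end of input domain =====

-- B replaces A's sequential threshold scan by bisect_left on [24,30,40,50,60]; objective: simpler.

-- ===== PORT A =====
-- while-loop of A, transliterated with fuel (the loop makes at most 7 tests of i < 61)
def pvLoopA (fuel : Nat) (argument x result i : Int) : Int :=
  match fuel with
  | 0 => result
  | fuel + 1 =>
    if i < 61 then
      if argument ≤ i then result
      else pvLoopA fuel argument 10 (result + 1) (i + x)
    else result

def switch_age_value (argument : Int) : Int :=
  pvLoopA 7 argument 6 1 24

-- ===== PORT B =====
-- bisect.bisect_left, transliterated as the CPython lo/hi while-loop (fuel 5 > log2(5) bounds the iterations)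
def pvBisectLeft (fuel : Nat) (xs : List Int) (target : Int) (lo hi : Nat) : Nat :=
  match fuel with
  | 0 => lo
  | fuel + 1 =>
    if lo < hi then
      let mid := (lo + hi) / 2
      if xs.getD mid 0 < target then pvBisectLeft fuel xs target (mid + 1) hi
      else pvBisectLeft fuel xs target lo mid
    else lo

def switch_age_value_alt (argument : Int) : Int :=
  1 + (pvBisectLeft 5 [24, 30, 40, 50, 60] argument 0 5 : Nat)

-- ===== PRECONDITION & SPEC =====
def Spec_switch_age_value (argument : Int) (out : Int) : Prop := out = switch_age_value_alt argument
instance (argument : Int) (out : Int) : Decidable (Spec_switch_age_value argument out) := by unfold Spec_switch_age_value; infer_instance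

-- ===== CLAIM (what is proved, stated in full; the proofs are below) =====
def Claim_equal_switch_age_value : Prop := ∀ (argument : Int), Dom_switch_age_value argument → Spec_switch_age_value argument (switch_age_value argument)

-- ===== LEMMAS AND PROOFS =====

-- ===== VERDICT (by name: the statement is the Claim_ definition above) =====
theorem switch_age_value_spec : Claim_equal_switch_age_value := by
  intro a _
  unfold Spec_switch_age_value switch_age_value switch_age_value_alt
  simp only [pvLoopA, pvBisectLeft, List.getD]
  norm_num
  split_ifs <;> first | rfl | omega
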